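-- pv_equiv track=rewrite | github.com/dp2426-NAU/Burnout_Risk_Prediction | ml/src/training/datasets.py | _detect_label_column
-- ===== SOURCE A (Python) =====
-- from typing import Dict, Iterable, List, Optional, Sequence, Tuple
--
-- def _detect_label_column(columns: Iterable[str]) -> Optional[str]:
--     preferred_order = [
--         lambda c: "burnoutrisk" in c,
--         lambda c: c.endswith("risk"),
--         lambda c: "burnout_risk" in c,
--         lambda c: c == "burnout",
--         lambda c: c.startswith("burnout"),
--     ]
--     column_list = list(columns)
--     for predicate in preferred_order:
--         for column in column_list:
--             if predicate(column.lower()):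
--                 return column
--     for column in columns:
--         lowered = column.lower()
--         if "burnout" in lowered or lowered.endswith("risk"):
--             return column
--     return None
-- ===== SOURCE B (Python) =====
-- def _rank(c):
--     # c is already lower-cased; smaller = more preferred
--     if "burnoutrisk" in c:
--         return 0
--     if c.endswith("risk"):
--         return 1
--     if "burnout_risk" in c:
--         return 2
--     if c == "burnout":
--         return 3
--     if c.startswith("burnout"):
--         return 4
--     if "burnout" in c or c.endswith("risk"):
--         return 5
--     return 6
--
--
-- def _detect_label_column(columns):
--     best_column = None
--     best_rank = 6
--     for column in columns:
--         r = _rank(column.lower())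
--         if r < best_rank:
--             best_rank = r
--             best_column = column
--     return best_column
-- ===== Notes on version B (the rewrite author's own statement) =====
-- stated objective: faster
-- what changed: Replaces the five sequential predicate passes plus a fallback pass over the list by a numeric rank function and one single pass keeping the best (lowest-rank, first-wins) column.
import Mathlib
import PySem

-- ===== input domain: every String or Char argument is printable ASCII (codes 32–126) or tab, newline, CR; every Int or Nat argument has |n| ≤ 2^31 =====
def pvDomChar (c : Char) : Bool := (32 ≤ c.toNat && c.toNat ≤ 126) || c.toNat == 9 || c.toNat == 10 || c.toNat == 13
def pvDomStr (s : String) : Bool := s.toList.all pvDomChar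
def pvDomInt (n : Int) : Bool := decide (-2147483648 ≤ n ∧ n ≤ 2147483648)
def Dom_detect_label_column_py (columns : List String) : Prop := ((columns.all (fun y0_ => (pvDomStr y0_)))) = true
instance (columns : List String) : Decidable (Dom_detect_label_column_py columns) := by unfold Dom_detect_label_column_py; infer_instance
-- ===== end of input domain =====

-- B replaces A's six sequential scans by a rank function and one best-keeping pass (alternative decomposition, same result).

-- ===== PORT A =====
-- literal transliteration: list of predicates, outer loop over predicates with inner
-- early-returning scan (findSome?/find?), then the fallback scan over `columns`.
def detect_label_column_py (columns : List String) : Option String :=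
  let preferred_order : List (String → Bool) :=
    [ fun c => PySem.Str.isIn "burnoutrisk" c,
      fun c => PySem.Str.endswith c "risk",
      fun c => PySem.Str.isIn "burnout_risk" c,
      fun c => c == "burnout",
      fun c => PySem.Str.startswith c "burnout" ]
  let column_list := columns
  match preferred_order.findSome?
      (fun predicate => column_list.find? (fun column => predicate (PySem.Str.lower column))) with
  | some column => some column
  | none =>
    match columns.find? (fun column =>
        let lowered := PySem.Str.lower column
        PySem.Str.isIn "burnout" lowered || PySem.Str.endswith lowered "risk") with
    | some column => some column
    | none => none

-- ===== PORT B =====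
-- B-side helper: rank of an (already lower-cased) name, 0..5 preferred, 6 = no match
def pyRank (c : String) : Nat :=
  if PySem.Str.isIn "burnoutrisk" c then 0
  else if PySem.Str.endswith c "risk" then 1
  else if PySem.Str.isIn "burnout_risk" c then 2
  else if c == "burnout" then 3
  else if PySem.Str.startswith c "burnout" then 4
  else if PySem.Str.isIn "burnout" c || PySem.Str.endswith c "risk" then 5
  else 6

def detect_label_column_py_alt (columns : List String) : Option String :=
  (columns.foldl
    (fun best column =>
      let r := pyRank (PySem.Str.lower column)
      if r < best.2 then (some column, r) else best)
    ((none : Option String), 6)).1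

-- ===== PRECONDITION & SPEC =====
def Spec_detect_label_column_py (columns : List String) (out : Option String) : Prop := out = detect_label_column_py_alt columns
instance (columns : List String) (out : Option String) : Decidable (Spec_detect_label_column_py columns out) := by unfold Spec_detect_label_column_py; infer_instance

-- ===== CLAIM (what is proved, stated in full; the proofs are below) =====
def Claim_equal_detect_label_column_py : Prop := ∀ (columns : List String), Dom_detect_label_column_py columns → Spec_detect_label_column_py columns (detect_label_column_py columns)

-- ===== LEMMAS AND PROOFS =====

-- canonical middle form: first column of the smallest rank below r
def pyBest (columns : List String) (r : Nat) : Option String :=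
  (List.range r).findSome? (fun k => columns.find? (fun c => pyRank (PySem.Str.lower c) == k))

theorem find?_congr_mem {α : Type} {p q : α → Bool} {l : List α}
    (h : ∀ a ∈ l, p a = q a) : l.find? p = l.find? q := by
  induction l with
  | nil => rfl
  | cons x xs ih =>
    simp only [List.find?]
    rw [h x (by simp)]
    cases q x with
    | true => rfl
    | false => exact ih (fun a ha => h a (by simp [ha]))

theorem findSome?_congr_mem {α β : Type} {f g : α → Option β} {l : List α}
    (h : ∀ a ∈ l, f a = g a) : l.findSome? f = l.findSome? g := by
  induction l with
  | nil => rfl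
  | cons x xs ih =>
    simp only [List.findSome?]
    rw [h x (by simp)]
    cases g x with
    | some b => rfl
    | none => exact ih (fun a ha => h a (by simp [ha]))

-- pointwise rank characterisations
theorem rank0 (s : String) : PySem.Str.isIn "burnoutrisk" s = (pyRank s == 0) := by
  unfold pyRank; split_ifs <;> simp_all

theorem rank1 (s : String) (h0 : PySem.Str.isIn "burnoutrisk" s = false) :
    PySem.Str.endswith s "risk" = (pyRank s == 1) := by
  unfold pyRank; split_ifs <;> simp_all

theorem rank2 (s : String) (h0 : PySem.Str.isIn "burnoutrisk" s = false)
    (h1 : PySem.Str.endswith s "risk" = false) :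
    PySem.Str.isIn "burnout_risk" s = (pyRank s == 2) := by
  unfold pyRank; split_ifs <;> simp_all

theorem rank3 (s : String) (h0 : PySem.Str.isIn "burnoutrisk" s = false)
    (h1 : PySem.Str.endswith s "risk" = false)
    (h2 : PySem.Str.isIn "burnout_risk" s = false) :
    (s == "burnout") = (pyRank s == 3) := by
  unfold pyRank; split_ifs <;> simp_all

theorem rank4 (s : String) (h0 : PySem.Str.isIn "burnoutrisk" s = false)
    (h1 : PySem.Str.endswith s "risk" = false)
    (h2 : PySem.Str.isIn "burnout_risk" s = false)
    (h3 : (s == "burnout") = false) :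
    PySem.Str.startswith s "burnout" = (pyRank s == 4) := by
  unfold pyRank; split_ifs <;> simp_all

theorem rank5 (s : String) (h0 : PySem.Str.isIn "burnoutrisk" s = false)
    (h1 : PySem.Str.endswith s "risk" = false)
    (h2 : PySem.Str.isIn "burnout_risk" s = false)
    (h3 : (s == "burnout") = false)
    (h4 : PySem.Str.startswith s "burnout" = false) :
    (PySem.Str.isIn "burnout" s || PySem.Str.endswith s "risk") = (pyRank s == 5) := by
  unfold pyRank; split_ifs <;> simp_all

-- pyBest on a cons: the new head either improves the bound or is ignored
theorem pyBest_cons_lt (c : String) (cs : List String) (r : Nat)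
    (h : pyRank (PySem.Str.lower c) < r) :
    pyBest (c :: cs) r = (pyBest cs (pyRank (PySem.Str.lower c))).or (some c) := by
  obtain ⟨d, rfl⟩ : ∃ d, r = pyRank (PySem.Str.lower c) + (d + 1) :=
    ⟨r - pyRank (PySem.Str.lower c) - 1, by omega⟩
  unfold pyBest
  rw [List.range_add, List.findSome?_append]
  have h2 : List.findSome?
      (fun k => List.find? (fun x => pyRank (PySem.Str.lower x) == k) (c :: cs))
      (List.map (fun x => pyRank (PySem.Str.lower c) + x) (List.range (d + 1)))
      = some c := by
    rw [List.range_succ_eq_map]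
    simp [List.find?]
  rw [h2]
  have h1 : List.findSome?
      (fun k => List.find? (fun x => pyRank (PySem.Str.lower x) == k) (c :: cs))
      (List.range (pyRank (PySem.Str.lower c)))
      = List.findSome?
      (fun k => List.find? (fun x => pyRank (PySem.Str.lower x) == k) cs)
      (List.range (pyRank (PySem.Str.lower c))) := by
    apply findSome?_congr_mem
    intro k hk
    rw [List.mem_range] at hk
    rw [List.find?_cons]
    have : (pyRank (PySem.Str.lower c) == k) = false := by simp; omega
    rw [this]
  rw [h1]

theorem pyBest_cons_ge (c : String) (cs : List String) (r : Nat)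
    (h : ¬ pyRank (PySem.Str.lower c) < r) :
    pyBest (c :: cs) r = pyBest cs r := by
  unfold pyBest
  apply findSome?_congr_mem
  intro k hk
  rw [List.mem_range] at hk
  rw [List.find?_cons]
  have : (pyRank (PySem.Str.lower c) == k) = false := by simp; omega
  rw [this]

-- B's fold equals the canonical form
theorem foldB_eq_pyBest (columns : List String) (b : Option String) (r : Nat) :
    (columns.foldl
      (fun best column =>
        let rr := pyRank (PySem.Str.lower column)
        if rr < best.2 then (some column, rr) else best)
      (b, r)).1 = (pyBest columns r).or b := by
  induction columns generalizing b r with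
  | nil =>
    have : ∀ l : List Nat, (List.findSome? (fun _ => (none : Option String)) l) = none := by
      intro l; induction l with
      | nil => rfl
      | cons x xs ih => simp [List.findSome?, ih]
    simp [pyBest, this]
  | cons c cs ih =>
    simp only [List.foldl]
    by_cases h : pyRank (PySem.Str.lower c) < r
    · simp only [h, if_pos, ih]
      rw [pyBest_cons_lt c cs r h, Option.or_assoc, Option.some_or]
    · simp only [h, ih, if_false]
      rw [pyBest_cons_ge c cs r h]

-- A equals the canonical form
theorem portA_eq_pyBest (columns : List String) :
    detect_label_column_py columns = pyBest columns 6 := by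
  unfold detect_label_column_py pyBest
  rw [show List.range 6 = [0, 1, 2, 3, 4, 5] from rfl]
  simp only [List.findSome?]
  rw [find?_congr_mem (fun a _ => rank0 (PySem.Str.lower a))]
  cases h0 : columns.find? (fun c => pyRank (PySem.Str.lower c) == 0) with
  | some c => simp
  | none =>
    have H0 : ∀ a ∈ columns, PySem.Str.isIn "burnoutrisk" (PySem.Str.lower a) = false := by
      intro a ha
      have := List.find?_eq_none.mp h0 a ha
      rw [rank0]; simpa using this
    simp only
    rw [find?_congr_mem (fun a ha => rank1 (PySem.Str.lower a) (H0 a ha))]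
    cases h1 : columns.find? (fun c => pyRank (PySem.Str.lower c) == 1) with
    | some c => simp
    | none =>
      have H1 : ∀ a ∈ columns, PySem.Str.endswith (PySem.Str.lower a) "risk" = false := by
        intro a ha
        have := List.find?_eq_none.mp h1 a ha
        rw [rank1 _ (H0 a ha)]; simpa using this
      simp only
      rw [find?_congr_mem (fun a ha => rank2 (PySem.Str.lower a) (H0 a ha) (H1 a ha))]
      cases h2 : columns.find? (fun c => pyRank (PySem.Str.lower c) == 2) with
      | some c => simp
      | none =>
        have H2 : ∀ a ∈ columns, PySem.Str.isIn "burnout_risk" (PySem.Str.lower a) = false := by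
          intro a ha
          have := List.find?_eq_none.mp h2 a ha
          rw [rank2 _ (H0 a ha) (H1 a ha)]; simpa using this
        simp only
        rw [find?_congr_mem (fun a ha => rank3 (PySem.Str.lower a) (H0 a ha) (H1 a ha) (H2 a ha))]
        cases h3 : columns.find? (fun c => pyRank (PySem.Str.lower c) == 3) with
        | some c => simp
        | none =>
          have H3 : ∀ a ∈ columns, (PySem.Str.lower a == "burnout") = false := by
            intro a ha
            have := List.find?_eq_none.mp h3 a ha
            rw [rank3 _ (H0 a ha) (H1 a ha) (H2 a ha)]; simpa using this
          simp only
          rw [find?_congr_mem (fun a ha => rank4 (PySem.Str.lower a) (H0 a ha) (H1 a ha) (H2 a ha) (H3 a ha))]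
          cases h4 : columns.find? (fun c => pyRank (PySem.Str.lower c) == 4) with
          | some c => simp
          | none =>
            have H4 : ∀ a ∈ columns, PySem.Str.startswith (PySem.Str.lower a) "burnout" = false := by
              intro a ha
              have := List.find?_eq_none.mp h4 a ha
              rw [rank4 _ (H0 a ha) (H1 a ha) (H2 a ha) (H3 a ha)]; simpa using this
            simp only
            rw [find?_congr_mem (fun a ha => rank5 (PySem.Str.lower a) (H0 a ha) (H1 a ha) (H2 a ha) (H3 a ha) (H4 a ha))]
            cases h5 : columns.find? (fun c => pyRank (PySem.Str.lower c) == 5) with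
            | some c => simp
            | none => simp

-- ===== VERDICT (by name: the statement is the Claim_ definition above) =====
theorem detect_label_column_py_spec : Claim_equal_detect_label_column_py := by
  intro columns _
  unfold Spec_detect_label_column_py detect_label_column_py_alt
  rw [foldB_eq_pyBest, portA_eq_pyBest]
  simp
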